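-- pv_equiv track=rewrite | github.com/splitfireai-hue/sentinelcorp | app/services/validators.py | _gstin_checksum
-- ===== SOURCE A (Python) =====
-- GSTIN_CHECKSUM_CHARS = "0123456789ABCDEFGHIJKLMNOPQRSTUVWXYZ"
--
-- def _gstin_checksum(gstin_first_14: str) -> str:
--     """Calculate Luhn mod 36 checksum for GSTIN."""
--     factor = 2
--     total = 0
--     code_len = len(GSTIN_CHECKSUM_CHARS)
--
--     for ch in reversed(gstin_first_14):
--         digit = GSTIN_CHECKSUM_CHARS.index(ch)
--         digit = digit * factor
--         factor = 1 if factor == 2 else 2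
--         digit = (digit // code_len) + (digit % code_len)
--         total += digit
--
--     remainder = total % code_len
--     check_code_point = (code_len - remainder) % code_len
--     return GSTIN_CHECKSUM_CHARS[check_code_point]
-- ===== SOURCE B (Python) =====
-- GSTIN_CHECKSUM_CHARS = "0123456789ABCDEFGHIJKLMNOPQRSTUVWXYZ"
--
-- def _contrib2(ch):
--     d = 2 * GSTIN_CHECKSUM_CHARS.index(ch)
--     return d // 36 + d % 36
--
-- def _gstin_checksum(gstin_first_14: str) -> str:
--     """Luhn mod 36 checksum, pairwise over the reversed string (no toggle state)."""
--     total = 0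
--     rest = gstin_first_14[::-1]
--     while len(rest) >= 2:
--         total += _contrib2(rest[0]) + GSTIN_CHECKSUM_CHARS.index(rest[1])
--         rest = rest[2:]
--     if rest:
--         total += _contrib2(rest)
--     return GSTIN_CHECKSUM_CHARS[(36 - total % 36) % 36]
-- ===== Notes on version B (the rewrite author's own statement) =====
-- stated objective: alternative
-- what changed: Replaces the toggled factor state with a pairwise pass: the reversed string is consumed two characters at a time (doubled-digit contribution for the first, plain index for the second), with a single leftover char handled once after the loop.
import Mathlib
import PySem

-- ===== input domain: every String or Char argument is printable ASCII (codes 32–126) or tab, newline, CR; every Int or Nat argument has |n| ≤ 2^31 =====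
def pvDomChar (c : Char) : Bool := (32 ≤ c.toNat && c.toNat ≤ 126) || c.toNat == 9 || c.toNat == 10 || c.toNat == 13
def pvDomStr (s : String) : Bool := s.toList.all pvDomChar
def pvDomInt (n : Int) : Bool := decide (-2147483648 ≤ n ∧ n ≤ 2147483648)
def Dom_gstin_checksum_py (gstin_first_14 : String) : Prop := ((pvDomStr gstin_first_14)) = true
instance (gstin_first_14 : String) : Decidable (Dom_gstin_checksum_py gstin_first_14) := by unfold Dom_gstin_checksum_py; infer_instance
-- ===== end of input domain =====

-- B consumes the reversed string two characters at a time instead of toggling a factor; the equivalence is return-value only.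

-- shared module constant GSTIN_CHECKSUM_CHARS and the '.index' lookup (total form; Pre_ excludes the ValueError inputs)
def pvGstinChars : List Char := "0123456789ABCDEFGHIJKLMNOPQRSTUVWXYZ".toList

def pvIdx (ch : Char) : Int := (((PySem.List.index? pvGstinChars ch).getD 0 : Nat) : Int)

-- ===== PORT A =====
def gstin_checksum_py (gstin_first_14 : String) : String :=
  let codeLen : Int := (pvGstinChars.length : Int)
  let st := gstin_first_14.toList.reverse.foldl (fun (p : Int × Int) ch =>
      let digit := pvIdx ch
      let digit := digit * p.1
      let factor : Int := if p.1 = 2 then 1 else 2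
      let digit := PySem.Int.floordiv digit codeLen + PySem.Int.mod digit codeLen
      (factor, p.2 + digit)) (2, 0)
  let remainder := PySem.Int.mod st.2 codeLen
  let check := PySem.Int.mod (codeLen - remainder) codeLen
  String.mk [PySem.List.pyGetD pvGstinChars check '0']

-- ===== PORT B =====
def pvContrib2 (ch : Char) : Int :=
  let d := 2 * pvIdx ch
  PySem.Int.floordiv d 36 + PySem.Int.mod d 36

def pvAltLoop : Int → List Char → Int
  | total, a :: b :: rest => pvAltLoop (total + (pvContrib2 a + pvIdx b)) rest
  | total, [a] => total + pvContrib2 a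
  | total, [] => total

def gstin_checksum_py_alt (gstin_first_14 : String) : String :=
  let total := pvAltLoop 0 gstin_first_14.toList.reverse
  String.mk [PySem.List.pyGetD pvGstinChars (PySem.Int.mod (36 - PySem.Int.mod total 36) 36) '0']

-- ===== PRECONDITION & SPEC =====
-- Pre_: every character occurs in GSTIN_CHECKSUM_CHARS; on any other character Python's .index raises ValueError.
def Pre_gstin_checksum_py (gstin_first_14 : String) : Prop :=
  (gstin_first_14.toList.all (fun c => pvGstinChars.contains c)) = true
instance (gstin_first_14 : String) : Decidable (Pre_gstin_checksum_py gstin_first_14) := by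
  unfold Pre_gstin_checksum_py; infer_instance

def pvWitness_gstin_checksum_py : String := "07AB"

def Spec_gstin_checksum_py (gstin_first_14 : String) (out : String) : Prop := out = gstin_checksum_py_alt gstin_first_14
instance (gstin_first_14 : String) (out : String) : Decidable (Spec_gstin_checksum_py gstin_first_14 out) := by unfold Spec_gstin_checksum_py; infer_instance

-- ===== CLAIM (what is proved, stated in full; the proofs are below) =====
def Claim_equal_gstin_checksum_py : Prop := ∀ (gstin_first_14 : String), Dom_gstin_checksum_py gstin_first_14 → Pre_gstin_checksum_py gstin_first_14 → Spec_gstin_checksum_py gstin_first_14 (gstin_checksum_py gstin_first_14)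

-- ===== LEMMAS AND PROOFS =====

theorem pvGstinChars_length : pvGstinChars.length = 36 := by decide

theorem pvIdx_bounds (ch : Char) : 0 ≤ pvIdx ch ∧ pvIdx ch < 36 := by
  unfold pvIdx
  cases h : PySem.List.index? pvGstinChars ch with
  | none => simp
  | some k =>
    obtain ⟨hk, -⟩ := PySem.List.getElem_of_index?_eq_some h
    rw [pvGstinChars_length] at hk
    simp
    omega

def pvStepA (p : Int × Int) (ch : Char) : Int × Int :=
  let digit := pvIdx ch
  let digit := digit * p.1
  let factor : Int := if p.1 = 2 then 1 else 2
  let digit := PySem.Int.floordiv digit 36 + PySem.Int.mod digit 36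
  (factor, p.2 + digit)

theorem pvLoop_eq : ∀ (l : List Char) (total : Int),
    (l.foldl pvStepA (2, total)).2 = pvAltLoop total l
  | [], total => by simp [pvAltLoop]
  | [a], total => by
    simp [pvAltLoop, pvStepA, pvContrib2, PySem.Int.floordiv, PySem.Int.mod,
      Int.fdiv_eq_ediv, Int.fmod_eq_emod]
    omega
  | a :: b :: rest, total => by
    have hb := pvIdx_bounds b
    have : pvStepA (pvStepA (2, total) a) b
        = (2, total + (pvContrib2 a + pvIdx b)) := by
      simp [pvStepA, pvContrib2, mul_comm, PySem.Int.floordiv, PySem.Int.mod,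
        Int.fdiv_eq_ediv, Int.fmod_eq_emod]
      omega
    calc ((a :: b :: rest).foldl pvStepA (2, total)).2
        = (rest.foldl pvStepA (pvStepA (pvStepA (2, total) a) b)).2 := by
          simp [List.foldl]
      _ = (rest.foldl pvStepA (2, total + (pvContrib2 a + pvIdx b))).2 := by rw [this]
      _ = pvAltLoop (total + (pvContrib2 a + pvIdx b)) rest := pvLoop_eq rest _
      _ = pvAltLoop total (a :: b :: rest) := by simp [pvAltLoop]
termination_by l _ => l.length

-- ===== VERDICT (by name: the statement is the Claim_ definition above) =====
theorem gstin_checksum_py_spec : Claim_equal_gstin_checksum_py := by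
  intro s _ _
  unfold Spec_gstin_checksum_py gstin_checksum_py gstin_checksum_py_alt
  have hfold : (s.toList.reverse.foldl (fun (p : Int × Int) ch =>
      let digit := pvIdx ch
      let digit := digit * p.1
      let factor : Int := if p.1 = 2 then 1 else 2
      let digit := PySem.Int.floordiv digit ((pvGstinChars.length : Nat) : Int)
        + PySem.Int.mod digit ((pvGstinChars.length : Nat) : Int)
      (factor, p.2 + digit)) (2, 0)).2 = pvAltLoop 0 s.toList.reverse := by
    rw [show ((pvGstinChars.length : Nat) : Int) = 36 by rw [pvGstinChars_length]; norm_num]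
    exact pvLoop_eq s.toList.reverse 0
  simp only []
  rw [show ((pvGstinChars.length : Nat) : Int) = 36 by rw [pvGstinChars_length]; norm_num] at hfold ⊢
  rw [hfold]
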